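-- pv_equiv track=rewrite | github.com/Dreknar/algorithms-and-data-structures | python/finders.py | find_longest_series
-- ===== SOURCE A (Python) =====
-- def find_longest_series(numbers: list, asc=True) -> list:
--     """
--     Find the longest ascending/descending series in list. Including equal values!
--     Arguments:
--         numbers (list): list of numbers
--         asc (bool): find ascending series (default). Set False for descending order.
--
--     Returns:
--         (list): the longest ascending/descending series
--     """
--     longest_series = 0
--     current_series = 1
--     last_item = 0
--     first_item = 0
--
--     if asc:
--         for i in range(1, len(numbers)):
--             if numbers[i] > numbers[i - 1]:
--                 current_series += 1
--             elif current_series > longest_series: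
--                 longest_series = current_series
--                 current_series = 1
--                 last_item = i
--                 first_item = i - longest_series
--             else:
--                 current_series = 1
--
--         if current_series > longest_series:
--             longest_series = current_series
--             last_item = len(numbers)
--             first_item = last_item - longest_series
--     else:
--         for i in range(1, len(numbers)):
--             if numbers[i] < numbers[i - 1]:
--                 current_series += 1
--             elif current_series > longest_series:
--                 longest_series = current_series
--                 current_series = 1
--                 last_item = i
--                 first_item = i - longest_series
--             else:
--                 current_series = 1
--
--         if current_series > longest_series:
--             longest_series = current_series
--             last_item = len(numbers)
--             first_item = last_item - longest_series
--
--     return numbers[first_item:last_item]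
-- ===== SOURCE B (Python) =====
-- def find_longest_series(numbers: list, asc=True) -> list:
--     """Two-pass version: build maximal-run segments, then pick the first longest."""
--     if not numbers:
--         return []
--     segments = []
--     start = 0
--     for i in range(1, len(numbers)):
--         keeps = numbers[i] > numbers[i - 1] if asc else numbers[i] < numbers[i - 1]
--         if not keeps:
--             segments.append((start, i))
--             start = i
--     segments.append((start, len(numbers)))
--     best = (0, 0)
--     for s, e in segments:
--         if e - s > best[1] - best[0]:
--             best = (s, e)
--     return numbers[best[0]:best[1]]
-- ===== Notes on version B (the rewrite author's own statement) =====
-- stated objective: alternative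
-- what changed: A streams one loop carrying (longest, current, last, first) counters; B first builds the list of maximal-run (start, end) segments in one pass, then selects the first longest segment in a separate pass and slices it out.
import Mathlib
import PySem

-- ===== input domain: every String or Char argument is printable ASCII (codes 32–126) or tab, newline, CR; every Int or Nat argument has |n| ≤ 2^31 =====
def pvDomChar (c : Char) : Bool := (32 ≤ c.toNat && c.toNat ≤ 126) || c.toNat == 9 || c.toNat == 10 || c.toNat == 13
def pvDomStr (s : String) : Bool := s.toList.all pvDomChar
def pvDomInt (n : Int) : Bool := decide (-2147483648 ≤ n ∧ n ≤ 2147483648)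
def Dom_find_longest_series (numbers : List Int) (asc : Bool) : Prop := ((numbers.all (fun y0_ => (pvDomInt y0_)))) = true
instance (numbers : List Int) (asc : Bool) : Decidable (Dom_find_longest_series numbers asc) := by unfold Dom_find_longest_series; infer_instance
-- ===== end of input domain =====

-- ===== PORT A =====
-- B returns the same value; it differs only in decomposition (segment list + selection pass vs streaming state).
-- numbers[i] for i in range(1, len(numbers)) is always in range; .getD 0 is never the default.
def pvGet (numbers : List Int) (i : Int) : Int := (PySem.List.pyGet? numbers i).getD 0

-- A's loop body (identical for asc/desc up to the comparison, which A duplicates textually).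
def pvStepA (cmp : Int → Int → Bool) (numbers : List Int)
    (st : Int × Int × Int × Int) (i : Int) : Int × Int × Int × Int :=
  let (longest, current, last, first) := st
  if cmp (pvGet numbers i) (pvGet numbers (i - 1)) then
    (longest, current + 1, last, first)
  else if current > longest then
    (current, 1, i, i - current)
  else
    (longest, 1, last, first)

def pvRunA (cmp : Int → Int → Bool) (numbers : List Int) : List Int :=
  let n : Int := (numbers.length : Int)
  let st := (PySem.List.pyRange 1 n 1).foldl (pvStepA cmp numbers) (0, 1, 0, 0)
  let (longest, current, last, first) := st
  if current > longest then
    PySem.List.slice numbers (some (n - current)) (some n)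
  else
    PySem.List.slice numbers (some first) (some last)

def find_longest_series (numbers : List Int) (asc : Bool) : List Int :=
  if asc then pvRunA (fun a b => a > b) numbers else pvRunA (fun a b => a < b) numbers

-- ===== PORT B =====
-- B's first pass: collect maximal-run segments (start, end-exclusive).
def pvStepB (cmp : Int → Int → Bool) (numbers : List Int)
    (st : List (Int × Int) × Int) (i : Int) : List (Int × Int) × Int :=
  if cmp (pvGet numbers i) (pvGet numbers (i - 1)) then st
  else (st.1 ++ [(st.2, i)], i)

-- B's second pass: first segment of strictly greatest length wins.
def pvSel (b : Int × Int) (se : Int × Int) : Int × Int :=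
  if se.2 - se.1 > b.2 - b.1 then se else b

def pvRunB (cmp : Int → Int → Bool) (numbers : List Int) : List Int :=
  let n : Int := (numbers.length : Int)
  let st := (PySem.List.pyRange 1 n 1).foldl (pvStepB cmp numbers) ([], 0)
  let segs := st.1 ++ [(st.2, n)]
  let best := segs.foldl pvSel (0, 0)
  PySem.List.slice numbers (some best.1) (some best.2)

def find_longest_series_alt (numbers : List Int) (asc : Bool) : List Int :=
  if numbers = [] then []
  else if asc then pvRunB (fun a b => a > b) numbers else pvRunB (fun a b => a < b) numbers

-- ===== PRECONDITION & SPEC =====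
def Spec_find_longest_series (numbers : List Int) (asc : Bool) (out : List Int) : Prop := out = find_longest_series_alt numbers asc
instance (numbers : List Int) (asc : Bool) (out : List Int) : Decidable (Spec_find_longest_series numbers asc out) := by unfold Spec_find_longest_series; infer_instance

-- ===== CLAIM (what is proved, stated in full; the proofs are below) =====
def Claim_equal_find_longest_series : Prop := ∀ (numbers : List Int) (asc : Bool), Dom_find_longest_series numbers asc → Spec_find_longest_series numbers asc (find_longest_series numbers asc)

-- ===== LEMMAS AND PROOFS =====

-- Invariant tying A's streaming state to B's (segments, open-run start) after scanning i = 1..n-1 up to bound n: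
-- current = n - start of open run, and (longest, last, first) is the selection over the closed segments.
def pvInv (a : Int × Int × Int × Int) (b : List (Int × Int) × Int) (n : Int) : Prop :=
  a.2.1 = n - b.2 ∧
  (a.1, a.2.2.1, a.2.2.2) =
    (let be := b.1.foldl pvSel (0, 0); (be.2 - be.1, be.2, be.1))

lemma pvInv_step (cmp : Int → Int → Bool) (numbers : List Int)
    (a : Int × Int × Int × Int) (b : List (Int × Int) × Int) (n : Int)
    (h : pvInv a b n) :
    pvInv (pvStepA cmp numbers a n) (pvStepB cmp numbers b n) (n + 1) := by
  obtain ⟨a1, a2, a3, a4⟩ := a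
  obtain ⟨bs, bc⟩ := b
  obtain ⟨h1, h2⟩ := h
  simp only [pvInv] at h1 h2 ⊢
  simp only [Prod.mk.injEq] at h2
  obtain ⟨h2a, h2b, h2c⟩ := h2
  by_cases hc : cmp (pvGet numbers n) (pvGet numbers (n - 1))
  · simp only [pvStepA, pvStepB, hc, if_pos]
    refine ⟨by omega, by simp [h2a, h2b, h2c]⟩
  · simp only [pvStepA, pvStepB, hc, if_neg, Bool.false_eq_true, not_false_iff]
    rw [List.foldl_append]
    simp only [List.foldl_cons, List.foldl_nil]
    by_cases hl : a2 > a1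
    · have : pvSel (bs.foldl pvSel (0, 0)) (bc, n) = (bc, n) := by
        simp only [pvSel]; rw [if_pos]; omega
      rw [if_pos hl, this]
      exact ⟨by dsimp only; omega, by simp; omega⟩
    · have : pvSel (bs.foldl pvSel (0, 0)) (bc, n) = bs.foldl pvSel (0, 0) := by
        simp only [pvSel]; rw [if_neg]; omega
      rw [if_neg hl, this]
      exact ⟨by dsimp only; omega, by simp [h2a, h2b, h2c]⟩

lemma pvInv_fold (cmp : Int → Int → Bool) (numbers : List Int) (n : Nat) :
    pvInv ((PySem.List.pyRange 1 (n + 1) 1).foldl (pvStepA cmp numbers) (0, 1, 0, 0))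
          ((PySem.List.pyRange 1 (n + 1) 1).foldl (pvStepB cmp numbers) ([], 0))
          ((n : Int) + 1) := by
  induction n with
  | zero =>
      simp [pvInv]
  | succ m ih =>
      have hr : PySem.List.pyRange 1 ((m : Int) + 1 + 1) 1
          = PySem.List.pyRange 1 ((m : Int) + 1) 1 ++ [(m : Int) + 1] := by
        rw [PySem.List.pyRange_one_succ_right (by omega)]
      push_cast
      rw [hr, List.foldl_append, List.foldl_append]
      simpa using pvInv_step cmp numbers _ _ ((m : Int) + 1)
        (by simpa using ih)

lemma pvRun_eq (cmp : Int → Int → Bool) (numbers : List Int) (hne : numbers ≠ []) :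
    pvRunA cmp numbers = pvRunB cmp numbers := by
  obtain ⟨m, hm⟩ : ∃ m : Nat, numbers.length = m + 1 := by
    cases numbers with
    | nil => exact absurd rfl hne
    | cons x xs => exact ⟨xs.length, rfl⟩
  have hinv := pvInv_fold cmp numbers m
  unfold pvRunA pvRunB
  simp only [hm]
  push_cast
  set a := (PySem.List.pyRange 1 ((m : Int) + 1) 1).foldl (pvStepA cmp numbers) (0, 1, 0, 0) with ha
  set b := (PySem.List.pyRange 1 ((m : Int) + 1) 1).foldl (pvStepB cmp numbers) ([], 0) with hb
  obtain ⟨a1, a2, a3, a4⟩ := a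
  obtain ⟨bs, bc⟩ := b
  obtain ⟨h1, h2⟩ := hinv
  simp only at h1
  simp only [Prod.mk.injEq] at h2
  obtain ⟨h2a, h2b, h2c⟩ := h2
  rw [List.foldl_append]
  simp only [List.foldl_cons, List.foldl_nil]
  by_cases hl : a2 > a1
  · have : pvSel (bs.foldl pvSel (0, 0)) (bc, (m : Int) + 1) = (bc, (m : Int) + 1) := by
      simp only [pvSel]; rw [if_pos]; omega
    rw [if_pos hl, this]
    have : (m : Int) + 1 - a2 = bc := by omega
    simp [this]
  · have : pvSel (bs.foldl pvSel (0, 0)) (bc, (m : Int) + 1) = bs.foldl pvSel (0, 0) := by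
      simp only [pvSel]; rw [if_neg]; omega
    rw [if_neg hl, this, ← h2b, ← h2c]

-- ===== VERDICT (by name: the statement is the Claim_ definition above) =====
theorem find_longest_series_spec : Claim_equal_find_longest_series := by
  intro numbers asc _
  unfold Spec_find_longest_series find_longest_series find_longest_series_alt
  by_cases hne : numbers = []
  · subst hne
    cases asc <;> simp [pvRunA, PySem.List.slice]
  · rw [if_neg hne]
    cases asc <;> simp [pvRun_eq _ numbers hne]
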